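-- pv_equiv track=rewrite | github.com/namboy94/toktokkie | toktokkie/scripts/AnimeThemeDlCommand.py | segmentize
-- ===== SOURCE A (Python) =====
-- from typing import Tuple, Dict, List, Any
--
-- def segmentize(titles: List[str]) -> List[List[str]]:
--     """
--     Segments a list of titles into segments
--     :param titles: The titles to segmentize
--     :return: The segments
--     """
--
--     segments = []
--     current_segment = []
--
--     for i, title in enumerate(titles):
--         if i > 0 \
--                 and titles[i - 1] > title \
--                 and titles[i - 1][0].lower() != title[0].lower():
--             segments.append(current_segment)
--             current_segment = []
--         current_segment.append(title)
--     segments.append(current_segment)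
--
--     return segments
-- ===== SOURCE B (Python) =====
-- def segmentize(titles):
--     """
--     Segments a list of titles into segments (right-to-left single pass:
--     walk the titles backwards, opening a new segment at each break, then
--     reverse the collected structure once at the end).
--     """
--     if not titles:
--         return [[]]
--     rev_segs = [[titles[-1]]]
--     nxt = titles[-1]
--     for t in reversed(titles[:-1]):
--         if t > nxt and t[0].lower() != nxt[0].lower():
--             rev_segs.append([t])
--         else:
--             rev_segs[-1].append(t)
--         nxt = t
--     return [seg[::-1] for seg in reversed(rev_segs)]
-- ===== Notes on version B (the rewrite author's own statement) =====
-- stated objective: alternative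
-- what changed: Replaces A's forward enumerate loop with index lookbacks titles[i-1] and an incrementally grown current_segment by a single right-to-left pass that carries the next element, collects segments in reversed order, and reverses the structure once at the end.
import Mathlib
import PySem

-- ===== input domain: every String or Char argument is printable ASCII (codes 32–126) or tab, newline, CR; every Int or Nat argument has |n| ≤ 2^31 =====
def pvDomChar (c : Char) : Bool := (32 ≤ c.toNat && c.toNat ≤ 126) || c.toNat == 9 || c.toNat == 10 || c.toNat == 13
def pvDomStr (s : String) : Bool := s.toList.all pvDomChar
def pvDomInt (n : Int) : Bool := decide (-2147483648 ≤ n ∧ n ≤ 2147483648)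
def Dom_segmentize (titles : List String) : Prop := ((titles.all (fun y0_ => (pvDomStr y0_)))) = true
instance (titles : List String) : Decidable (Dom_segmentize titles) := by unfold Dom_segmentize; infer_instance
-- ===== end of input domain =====

-- B: right-to-left single pass carrying the next element (segments collected reversed, one final reverse)
-- instead of A's forward enumerate loop with titles[i-1] lookbacks; equal return values on Pre_ (alternative, not faster).


-- ===== PORT A =====
-- shared break test: 'a > b and a[0].lower() != b[0].lower()' (both Pythons contain this expression verbatim).
-- The 'none' char case is Python's IndexError on b = "" (a > b forces a ≠ ""); excluded by Pre_segmentize.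
def pvBrk (a b : String) : Bool :=
  decide (b < a) &&
    (match PySem.Str.pyGet? a 0, PySem.Str.pyGet? b 0 with
     | some c, some d => decide (¬ (PySem.Chars.lower [c] = PySem.Chars.lower [d]))
     | _, _ => false)

def segmentize (titles : List String) : List (List String) :=
  let step := fun (st : List (List String) × List String) (p : Int × String) =>
    let cond : Bool :=
      decide (0 < p.1) &&
        (match PySem.List.pyGet? titles (p.1 - 1) with
         | some prev => pvBrk prev p.2
         | none => false)   -- unreachable: enumerate indices i with i > 0 have i-1 in range
    if cond then (st.1 ++ [st.2], [p.2]) else (st.1, st.2 ++ [p.2])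
  let r := (PySem.List.enumerate titles 0).foldl step ([], [])
  r.1 ++ [r.2]

-- ===== PORT B =====
def segmentize_alt (titles : List String) : List (List String) :=
  match titles with
  | [] => [[]]
  | t0 :: ts =>
    let lastT := PySem.List.pyGetD (t0 :: ts) (-1) ""   -- titles[-1]
    let step := fun (st : List (List String) × String) (t : String) =>
      if pvBrk t st.2 then (st.1 ++ [[t]], t)
      else (st.1.dropLast ++ [(st.1.getLast?.getD []) ++ [t]], t)   -- rev_segs[-1].append(t)
    let r := ((PySem.List.slice (t0 :: ts) none (some (-1))).reverse).foldl step ([[lastT]], lastT)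
    (r.1.reverse).map List.reverse   -- [seg[::-1] for seg in reversed(rev_segs)]

-- ===== PRECONDITION & SPEC =====
-- Pre_ excludes exactly the inputs where Python raises IndexError (both A and B): an empty title
-- directly preceded by a non-empty one makes title[0] fail inside the break test.
def Pre_segmentize (titles : List String) : Prop :=
  ∀ p ∈ titles.zip titles.tail, p.2 = "" → p.1 = ""
instance (titles : List String) : Decidable (Pre_segmentize titles) := by unfold Pre_segmentize; infer_instance
def pvWitness_segmentize : List String := ["beta", "alpha", "Alps", "zoo"]

def Spec_segmentize (titles : List String) (out : List (List String)) : Prop := out = segmentize_alt titles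
instance (titles : List String) (out : List (List String)) : Decidable (Spec_segmentize titles out) := by unfold Spec_segmentize; infer_instance

-- ===== CLAIM (what is proved, stated in full; the proofs are below) =====
def Claim_equal_segmentize : Prop := ∀ (titles : List String), Dom_segmentize titles → Pre_segmentize titles → Spec_segmentize titles (segmentize titles)

-- ===== LEMMAS AND PROOFS =====

-- mid-level structural recursion both ports are reduced to
def segRec : List String → List (List String)
  | [] => [[]]
  | [a] => [[a]]
  | a :: b :: rest =>
    match segRec (b :: rest) with
    | s :: ss => if pvBrk a b then [a] :: s :: ss else (a :: s) :: ss
    | [] => [[]]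

theorem segRec_cons (t : String) (ts : List String) :
    ∃ tl ss, segRec (t :: ts) = (t :: tl) :: ss := by
  cases ts with
  | nil => exact ⟨[], [], rfl⟩
  | cons b rest =>
    obtain ⟨tl, ss, h⟩ := segRec_cons b rest
    by_cases hb : pvBrk t b = true
    · exact ⟨[], segRec (b :: rest), by simp [segRec, h, hb]⟩
    · exact ⟨b :: tl, ss, by simp [segRec, h, hb]⟩

-- pair-based form of A's loop
def goA (segs : List (List String)) (cur : List String) (prev : String) : List String → List (List String) × List String
  | [] => (segs, cur)
  | t :: ts => if pvBrk prev t then goA (segs ++ [cur]) [t] t ts else goA segs (cur ++ [t]) t ts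

theorem goA_spec (rest : List String) : ∀ (prev : String) (segs : List (List String)) (cur : List String),
    (goA segs cur prev rest).1 ++ [(goA segs cur prev rest).2]
      = segs ++ (match segRec (prev :: rest) with
                 | s :: ss => (cur ++ s.tail) :: ss
                 | [] => []) := by
  induction rest with
  | nil => intro prev segs cur; simp [goA, segRec]
  | cons t ts ih =>
    intro prev segs cur
    obtain ⟨tl, ss, h⟩ := segRec_cons t ts
    by_cases hb : pvBrk prev t = true
    · have := ih t (segs ++ [cur]) [t]
      simp [goA, hb, segRec, h] at this ⊢
      simp [this]
    · have := ih t segs (cur ++ [t])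
      simp [goA, hb, segRec, h] at this ⊢
      simp [this]

-- A's enumerate fold equals goA once one element has been consumed
theorem segA_fold (titles : List String) (rest : List String) :
    ∀ (pre : List String) (hpre : pre ≠ []) (segs : List (List String)) (cur : List String),
    titles = pre ++ rest →
    (PySem.List.enumerate rest (pre.length : Int)).foldl
      (fun (st : List (List String) × List String) (p : Int × String) =>
        let cond : Bool :=
          decide (0 < p.1) &&
            (match PySem.List.pyGet? titles (p.1 - 1) with
             | some prev => pvBrk prev p.2
             | none => false)
        if cond then (st.1 ++ [st.2], [p.2]) else (st.1, st.2 ++ [p.2])) (segs, cur)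
      = goA segs cur (pre.getLast hpre) rest := by
  induction rest with
  | nil => intro pre hpre segs cur ht; simp [PySem.List.enumerate, goA]
  | cons t ts ih =>
    intro pre hpre segs cur ht
    rw [PySem.List.enumerate_cons]
    have hlen : 1 ≤ pre.length := by
      cases pre with | nil => exact absurd rfl hpre | cons a l => simp
    have hget : PySem.List.pyGet? titles ((pre.length : Int) - 1) = some (pre.getLast hpre) := by
      have h1 : ((pre.length : Int) - 1) = ((pre.length - 1 : Nat) : Int) := by omega
      rw [h1, PySem.List.pyGet?_natCast]
      rw [ht]
      rw [List.getElem?_append_left (by omega)]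
      rw [List.getLast_eq_getElem]
      exact List.getElem?_eq_getElem _
    simp only [List.foldl_cons]
    have hcond : (decide (0 < (pre.length : Int)) &&
        (match PySem.List.pyGet? titles ((pre.length : Int) - 1) with
         | some prev => pvBrk prev t
         | none => false)) = pvBrk (pre.getLast hpre) t := by
      rw [hget]; simp; omega
    by_cases hb : pvBrk (pre.getLast hpre) t = true
    · have := ih (pre ++ [t]) (by simp) (segs ++ [cur]) [t] (by simp [ht])
      simp only [List.length_append, List.getLast_append] at this
      simp only [hcond, hb, goA]
      simpa [Nat.cast_add] using this
    · have := ih (pre ++ [t]) (by simp) segs (cur ++ [t]) (by simp [ht])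
      simp only [List.length_append, List.getLast_append] at this
      simp only [hcond, hb, goA]
      simpa [Nat.cast_add] using this

theorem segA_eq_segRec (titles : List String) : segmentize titles = segRec titles := by
  cases titles with
  | nil => simp [segmentize, segRec, PySem.List.enumerate]
  | cons t ts =>
    unfold segmentize
    rw [PySem.List.enumerate_cons]
    simp only [List.foldl_cons]
    have h0 : (decide ((0:Int) < 0) &&
        (match PySem.List.pyGet? (t :: ts) ((0:Int) - 1) with
         | some prev => pvBrk prev t
         | none => false)) = false := by simp
    have := segA_fold (t :: ts) ts [t] (by simp) [] [t] (by simp)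
    obtain ⟨tl, ss, h⟩ := segRec_cons t ts
    simp only [List.length_cons, List.length_nil, List.getLast_singleton] at this
    simp only [h0, Bool.false_eq_true, if_false, List.nil_append]
    norm_num at this ⊢
    rw [this, goA_spec, h]
    simp

-- B's right-to-left fold, after one element is seeded, builds segRec reversed (segments reversed too)
theorem segB_fold (ts : List String) : ∀ (t0 : String),
    ((t0 :: ts).dropLast.reverse.foldl
      (fun (st : List (List String) × String) (t : String) =>
        if pvBrk t st.2 then (st.1 ++ [[t]], t)
        else (st.1.dropLast ++ [(st.1.getLast?.getD []) ++ [t]], t))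
      ([[(t0 :: ts).getLast (by simp)]], (t0 :: ts).getLast (by simp)))
    = (((segRec (t0 :: ts)).map List.reverse).reverse, t0) := by
  induction ts with
  | nil => intro t0; simp [segRec]
  | cons b rest ih =>
    intro t0
    have hlast : (t0 :: b :: rest).getLast (by simp) = (b :: rest).getLast (by simp) := by
      rw [List.getLast_cons]
    have hdrop : (t0 :: b :: rest).dropLast.reverse = (b :: rest).dropLast.reverse ++ [t0] := by
      simp [List.dropLast_cons_of_ne_nil]
    rw [hlast, hdrop, List.foldl_append, ih b]
    simp only [List.foldl_cons, List.foldl_nil]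
    obtain ⟨tl, ss, h⟩ := segRec_cons b rest
    by_cases hb : pvBrk t0 b = true
    · simp [segRec, h, hb]
    · simp [segRec, h, hb]

theorem segB_eq_segRec (titles : List String) : segmentize_alt titles = segRec titles := by
  cases titles with
  | nil => simp [segmentize_alt, segRec]
  | cons t0 ts =>
    show ((((PySem.List.slice (t0 :: ts) none (some (-1))).reverse).foldl
      (fun (st : List (List String) × String) (t : String) =>
        if pvBrk t st.2 then (st.1 ++ [[t]], t)
        else (st.1.dropLast ++ [(st.1.getLast?.getD []) ++ [t]], t))
      ([[PySem.List.pyGetD (t0 :: ts) (-1) ""]], PySem.List.pyGetD (t0 :: ts) (-1) "")).1.reverse).map List.reverse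
      = segRec (t0 :: ts)
    rw [PySem.List.pyGetD_neg_one (t0 :: ts) "" (by simp), PySem.List.slice_to_neg_one]
    rw [segB_fold ts t0]
    simp [List.map_map]

-- ===== VERDICT (by name: the statement is the Claim_ definition above) =====
theorem segmentize_spec : Claim_equal_segmentize := by
  intro titles _ _
  unfold Spec_segmentize
  rw [segA_eq_segRec, segB_eq_segRec]
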